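-- pv_equiv track=rewrite | github.com/nsuberi/ResourceWatchCode | Metadata Management/long_forming.py | pick_value_cols
-- ===== SOURCE A (Python) =====
-- def pick_value_cols(col, prefixes, use_, only=None):
--     if use_:
--         seen = [True if pfx+'_' in col else False for pfx in prefixes]
--     else:
--         seen = [True if pfx in col else False for pfx in prefixes]
--
--     if only:
--         if sum(seen) == 1:
--             # Only one match, keep if it matches 'only'
--             if seen[prefixes.index(only)]:
--                 return True
--         elif sum(seen) > 1:
--             # More than one match, keep longest if it matches 'only'
--             seen_pfxs = [_[0] for _ in list(zip(prefixes,seen)) if _[1]]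
--             seen_lengths = [len(_) for _ in seen_pfxs]
--             max_index = seen_lengths.index(max(seen_lengths))
--             if prefixes.index(seen_pfxs[max_index]) == prefixes.index(only):
--                 return True
--     else:
--         if sum(seen):
--             return True
--     return False
-- ===== SOURCE B (Python) =====
-- def pick_value_cols(col, prefixes, use_, only=None):
--     # One forward pass: keep the first prefix whose (optionally underscored) form
--     # occurs in col and whose length strictly exceeds the best so far.
--     sep = '_' if use_ else ''
--     best = None
--     for p in prefixes:
--         if p + sep in col and (best is None or len(p) > len(best)):
--             best = p
--     if not only:
--         return best is not None
--     return best == only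
-- ===== Notes on version B (the rewrite author's own statement) =====
-- stated objective: simpler
-- what changed: Replaces A's staged passes (boolean mask, sum(), zip/filter, length list, two .index scans) by ONE forward loop keeping a single running accumulator: the first matched prefix of strictly maximal length; the answer is then 'best is not None' (only falsy) or the direct string comparison 'best == only', which is valid because first-occurrence indices in a list coincide exactly when the strings are equal.
import Mathlib
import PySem

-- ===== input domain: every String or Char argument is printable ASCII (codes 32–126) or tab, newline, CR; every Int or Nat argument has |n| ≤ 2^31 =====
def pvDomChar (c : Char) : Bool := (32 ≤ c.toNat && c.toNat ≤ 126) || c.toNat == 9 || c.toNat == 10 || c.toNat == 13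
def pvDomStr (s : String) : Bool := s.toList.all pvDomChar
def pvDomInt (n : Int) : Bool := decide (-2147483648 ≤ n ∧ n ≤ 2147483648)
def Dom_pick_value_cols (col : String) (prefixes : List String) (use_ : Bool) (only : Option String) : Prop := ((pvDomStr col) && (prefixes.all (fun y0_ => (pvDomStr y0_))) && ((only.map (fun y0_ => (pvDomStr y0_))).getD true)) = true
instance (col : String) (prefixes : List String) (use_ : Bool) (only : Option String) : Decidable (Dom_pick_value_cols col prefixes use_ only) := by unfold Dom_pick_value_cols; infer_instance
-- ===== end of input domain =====

-- B replaces A's staged passes (mask, sum, zip, length list, two .index scans) by one forward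
-- loop keeping the first matched prefix of strictly maximal length and a final string comparison.

-- ===== PORT A =====
def pick_value_cols (col : String) (prefixes : List String) (use_ : Bool) (only : Option String) : Bool :=
  let seen : List Bool :=
    if use_ then prefixes.map (fun pfx => if PySem.Str.isIn (pfx ++ "_") col then true else false)
    else prefixes.map (fun pfx => if PySem.Str.isIn pfx col then true else false)
  if !(only.getD "" == "") then   -- `if only:` (None and "" are both falsy)
    if seen.count true = 1 then
      -- seen[prefixes.index(only)]
      match PySem.List.index? prefixes (only.getD "") with
      | some i => seen.getD i false
      | none => false   -- Python raises ValueError here; excluded by Pre_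
    else if 1 < seen.count true then
      let seen_pfxs := ((prefixes.zip seen).filter (fun p => p.2)).map (fun p => p.1)
      let seen_lengths := seen_pfxs.map (fun s => PySem.Str.len s)
      match PySem.List.max? seen_lengths (fun x => x) with
      | none => false    -- unreachable: seen_lengths nonempty when count > 1
      | some mx =>
        match PySem.List.index? seen_lengths mx with
        | none => false  -- unreachable: mx is in seen_lengths
        | some max_index =>
          match seen_pfxs[max_index]? with
          | none => false  -- unreachable: max_index valid
          | some best =>
            match PySem.List.index? prefixes best, PySem.List.index? prefixes (only.getD "") with
            | some i, some j => decide (i = j)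
            | _, _ => false  -- index?(only)=none is Python's ValueError; excluded by Pre_
    else false
  else
    decide (0 < seen.count true)

-- ===== PORT B =====
def pick_value_cols_alt (col : String) (prefixes : List String) (use_ : Bool) (only : Option String) : Bool :=
  let sep := if use_ then "_" else ""
  let best : Option String := prefixes.foldl
    (fun best p =>
      if PySem.Str.isIn (p ++ sep) col
          && (best.elim true (fun b => decide (PySem.Str.len b < PySem.Str.len p)))
      then some p else best) none
  let s := only.getD ""   -- `not only`: None and "" are both falsy
  if s == "" then best.isSome
  else best == some s

-- ===== PRECONDITION & SPEC =====
-- Pre_ excludes exactly the inputs where A raises ValueError (only truthy, not a member of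
-- prefixes, while some prefix matches col); B returns False there.
def Pre_pick_value_cols (col : String) (prefixes : List String) (use_ : Bool) (only : Option String) : Prop :=
  only.getD "" = "" ∨ only.getD "" ∈ prefixes ∨ ∀ p ∈ prefixes, PySem.Str.isIn (if use_ then p ++ "_" else p) col = false
instance (col : String) (prefixes : List String) (use_ : Bool) (only : Option String) : Decidable (Pre_pick_value_cols col prefixes use_ only) := by unfold Pre_pick_value_cols; infer_instance

def pvWitness_pick_value_cols : String × List String × Bool × Option String := ("ab_x", ["ab", "c"], true, some "ab")

def Spec_pick_value_cols (col : String) (prefixes : List String) (use_ : Bool) (only : Option String) (out : Bool) : Prop := out = pick_value_cols_alt col prefixes use_ only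
instance (col : String) (prefixes : List String) (use_ : Bool) (only : Option String) (out : Bool) : Decidable (Spec_pick_value_cols col prefixes use_ only out) := by unfold Spec_pick_value_cols; infer_instance

-- ===== CLAIM (what is proved, stated in full; the proofs are below) =====
def Claim_equal_pick_value_cols : Prop := ∀ (col : String) (prefixes : List String) (use_ : Bool) (only : Option String), Dom_pick_value_cols col prefixes use_ only → Pre_pick_value_cols col prefixes use_ only → Spec_pick_value_cols col prefixes use_ only (pick_value_cols col prefixes use_ only)
-- ===== LEMMAS AND PROOFS =====

-- running max with accumulator (proof-side mirror of PySem.List.max?'s foldl)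
def pmaxStep {α : Type} (key : α → Int) (acc : Option α) (x : α) : Option α :=
  match acc with
  | none => some x
  | some m => if key m < key x then some x else some m

def gmax {α : Type} (key : α → Int) (m : α) (t : List α) : α :=
  t.foldl (fun a y => if key a < key y then y else a) m

theorem max?_eq_foldl {α : Type} (key : α → Int) (l : List α) :
    PySem.List.max? l key = List.foldl (pmaxStep key) none l := by
  unfold PySem.List.max?
  congr 1

theorem foldl_some_gmax {α : Type} (key : α → Int) (t : List α) (m : α) :
    List.foldl (pmaxStep key) (some m) t = some (gmax key m t) := by
  induction t generalizing m with
  | nil => rfl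
  | cons y t ih =>
    show List.foldl (pmaxStep key) (if key m < key y then some y else some m) t
      = some (gmax key m (y :: t))
    have hg : gmax key m (y :: t) = gmax key (if key m < key y then y else m) t := rfl
    by_cases h : key m < key y
    · rw [if_pos h, ih, hg, if_pos h]
    · rw [if_neg h, ih, hg, if_neg h]

theorem max?_cons_eq_gmax {α : Type} (key : α → Int) (x : α) (t : List α) :
    PySem.List.max? (x :: t) key = some (gmax key x t) := by
  rw [max?_eq_foldl]
  show List.foldl (pmaxStep key) (some x) t = _
  exact foldl_some_gmax key t x

-- B's fold over prefixes = the running max over the filtered list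
theorem fold_best_eq (m : String → Bool) (key : String → Int) (l : List String) :
    ∀ acc : Option String,
      List.foldl (fun best p =>
        if m p && (best.elim true (fun b => decide (key b < key p))) then some p else best) acc l
      = List.foldl (pmaxStep key) acc (l.filter m) := by
  induction l with
  | nil => intro acc; rfl
  | cons p t ih =>
    intro acc
    simp only [List.foldl_cons, List.filter_cons]
    by_cases hmp : m p = true
    · have hstep : (if m p && (acc.elim true (fun b => decide (key b < key p))) then some p else acc)
          = pmaxStep key acc p := by
        cases acc <;> simp [hmp, pmaxStep]
      rw [hstep, if_pos hmp, List.foldl_cons, ih]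
    · have hmp' : m p = false := by simpa using hmp
      have hstep : (if m p && (acc.elim true (fun b => decide (key b < key p))) then some p else acc)
          = acc := by simp [hmp']
      rw [hstep, if_neg hmp, ih]

theorem key_le_gmax {α : Type} (key : α → Int) (t : List α) (m : α) :
    key m ≤ key (gmax key m t) := by
  induction t generalizing m with
  | nil => simp [gmax]
  | cons y t ih =>
    have hg : gmax key m (y :: t) = gmax key (if key m < key y then y else m) t := rfl
    rw [hg]
    by_cases h : key m < key y
    · rw [if_pos h]; exact le_of_lt (lt_of_lt_of_le h (ih y))
    · rw [if_neg h]; exact ih m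

theorem gmax_eq_of_key_le {α : Type} (key : α → Int) (t : List α) (m : α)
    (h : key (gmax key m t) ≤ key m) : gmax key m t = m := by
  induction t generalizing m with
  | nil => rfl
  | cons y t ih =>
    have hg : gmax key m (y :: t) = gmax key (if key m < key y then y else m) t := rfl
    rw [hg] at h ⊢
    by_cases hy : key m < key y
    · exfalso
      rw [if_pos hy] at h
      exact absurd (lt_of_lt_of_le hy (key_le_gmax key t y)) (not_lt.mpr h)
    · rw [if_neg hy] at h ⊢; exact ih m h

-- the FIRST position attaining the max key holds exactly the running max element
theorem gmax_first {α : Type} (key : α → Int) :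
    ∀ (t : List α) (m : α) (j : Nat) (hj : j < t.length + 1),
      key ((m :: t)[j]'(by simpa using hj)) = key (gmax key m t) →
      (∀ i (hi : i < j), key ((m :: t)[i]'(by simp; omega)) ≠ key (gmax key m t)) →
      (m :: t)[j]'(by simpa using hj) = gmax key m t := by
  intro t
  induction t with
  | nil =>
    intro m j hj hkey _
    have hj0 : j = 0 := by simp at hj; omega
    subst hj0
    rfl
  | cons y t ih =>
    intro m j hj hkey hmin
    have hg : gmax key m (y :: t) = gmax key (if key m < key y then y else m) t := rfl
    by_cases hy : key m < key y
    · rw [if_pos hy] at hg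
      match j, hj with
      | 0, _ =>
        exfalso
        simp only [List.getElem_cons_zero] at hkey
        rw [hg] at hkey
        have := lt_of_lt_of_le hy (key_le_gmax key t y)
        omega
      | j' + 1, hj =>
        have hj' : j' < t.length + 1 := by simp at hj; omega
        rw [hg]
        have := ih y j' hj'
          (by rw [← hg]; simpa using hkey)
          (by
            intro i hi
            have := hmin (i + 1) (by omega)
            rw [← hg]; simpa using this)
        simpa using this
    · rw [if_neg hy] at hg
      match j, hj with
      | 0, _ =>
        simp only [List.getElem_cons_zero] at hkey ⊢
        rw [hg] at hkey ⊢
        exact (gmax_eq_of_key_le key t m (le_of_eq hkey.symm)).symm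
      | 1, hj =>
        exfalso
        simp only [List.getElem_cons_succ, List.getElem_cons_zero] at hkey
        have h0 := hmin 0 (by omega)
        simp only [List.getElem_cons_zero] at h0
        have hym : key y ≤ key m := not_lt.mp hy
        rw [hg] at hkey h0
        have := key_le_gmax key t m
        omega
      | j' + 2, hj =>
        have hj' : j' + 1 < t.length + 1 := by simp at hj; omega
        rw [hg]
        have := ih m (j' + 1) hj'
          (by rw [← hg]; simpa using hkey)
          (by
            intro i hi
            rw [← hg]
            match i, hi with
            | 0, _ =>
              have := hmin 0 (by omega)
              simpa using this
            | i' + 1, hi =>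
              have := hmin (i' + 2) (by omega)
              simpa using this)
        simpa using this

-- max? commutes with mapping the key
theorem max?_map_aux {α : Type} (key : α → Int) :
    ∀ (l : List α) (acc : Option α),
      List.foldl (pmaxStep (fun x : Int => x)) (acc.map key) (l.map key)
      = (List.foldl (pmaxStep key) acc l).map key := by
  intro l
  induction l with
  | nil => intro acc; simp
  | cons x t ih =>
    intro acc
    simp only [List.map_cons, List.foldl_cons]
    cases acc with
    | none => exact ih (some x)
    | some m =>
      simp only [Option.map_some]
      show List.foldl (pmaxStep (fun x : Int => x))
          (if key m < key x then some (key x) else some (key m)) (List.map key t)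
        = Option.map key (List.foldl (pmaxStep key)
          (if key m < key x then some x else some m) t)
      by_cases h : key m < key x
      · rw [if_pos h, if_pos h]
        exact ih (some x)
      · rw [if_neg h, if_neg h]
        exact ih (some m)

theorem max?_map_key {α : Type} (key : α → Int) (l : List α) :
    PySem.List.max? (l.map key) (fun x => x) = (PySem.List.max? l key).map key := by
  rw [max?_eq_foldl, max?_eq_foldl]
  have h := max?_map_aux key l none
  simp only [Option.map_none] at h
  exact h

-- A's "index of the max length, then that element" = the running max element
theorem argmax_chain {α : Type} (key : α → Int) (l : List α) (M : α)
    (h : PySem.List.max? l key = some M) :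
    ∃ k, PySem.List.max? (l.map key) (fun x => x) = some (key M) ∧
      PySem.List.index? (l.map key) (key M) = some k ∧
      l[k]? = some M := by
  have hmem : M ∈ l := PySem.List.max?_mem h
  have hmx : PySem.List.max? (l.map key) (fun x => x) = some (key M) := by
    rw [max?_map_key, h]; rfl
  have hkm : key M ∈ l.map key := List.mem_map_of_mem hmem
  have hidx : (PySem.List.index? (l.map key) (key M)).isSome := by
    rw [PySem.List.index?_isSome_iff]; exact hkm
  obtain ⟨k, hk⟩ := Option.isSome_iff_exists.mp hidx
  refine ⟨k, hmx, hk, ?_⟩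
  obtain ⟨hklen, hval, hfirst⟩ := PySem.List.getElem_of_index?_eq_some hk
  have hklen' : k < l.length := by simpa using hklen
  cases l with
  | nil => cases hmem
  | cons x t =>
    have hM : M = gmax key x t := by
      have := max?_cons_eq_gmax key x t
      rw [h] at this; exact Option.some.inj this
    have hkey : key ((x :: t)[k]'(hklen')) = key (gmax key x t) := by
      rw [← hM]
      rw [List.getElem_map] at hval
      exact hval
    have hmin : ∀ i (hi : i < k), key ((x :: t)[i]'(by omega)) ≠ key (gmax key x t) := by
      intro i hi
      have := hfirst i (by omega)
      rw [List.getElem_map] at this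
      rw [← hM]
      exact this
    have := gmax_first key t x k (by simpa using hklen') hkey hmin
    rw [List.getElem?_eq_getElem hklen', this, hM]

-- seen = prefixes.map m
theorem seen_eq (col : String) (prefixes : List String) (use_ : Bool) :
    (if use_ then prefixes.map (fun pfx => if PySem.Str.isIn (pfx ++ "_") col then true else false)
     else prefixes.map (fun pfx => if PySem.Str.isIn pfx col then true else false))
    = prefixes.map (fun p => PySem.Str.isIn (if use_ then p ++ "_" else p) col) := by
  cases use_ <;> simp

theorem count_map_true (l : List String) (m : String → Bool) :
    (l.map m).count true = (l.filter m).length := by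
  induction l with
  | nil => rfl
  | cons a t ih =>
    simp only [List.map_cons, List.count_cons, List.filter_cons]
    cases h : m a <;> simp [ih]

theorem zip_filter_map (l : List String) (m : String → Bool) :
    ((l.zip (l.map m)).filter (fun p => p.2)).map (fun p => p.1) = l.filter m := by
  induction l with
  | nil => rfl
  | cons a t ih =>
    simp only [List.map_cons, List.zip_cons_cons, List.filter_cons]
    cases h : m a <;> simp [ih]

theorem a_falsy_eq_core (prefixes : List String) (m : String → Bool) :
    decide (0 < ((prefixes.map m).count true))
    = (PySem.List.max? (prefixes.filter m) (fun p => PySem.Str.len p)).isSome := by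
  rw [count_map_true]
  cases h : prefixes.filter m with
  | nil => rw [max?_eq_foldl]; simp
  | cons q t => rw [max?_cons_eq_gmax]; simp

theorem index?_getElem_eq {α : Type} [BEq α] [LawfulBEq α] (l : List α) (a b : α) (i j : Nat)
    (ha : PySem.List.index? l a = some i) (hb : PySem.List.index? l b = some j)
    (hij : i = j) : a = b := by
  obtain ⟨hi, hai, -⟩ := PySem.List.getElem_of_index?_eq_some ha
  obtain ⟨hj, hbj, -⟩ := PySem.List.getElem_of_index?_eq_some hb
  subst hij
  rw [← hai, ← hbj]

-- the equivalence with the match predicate abstracted (applied at use_=true/false below)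
theorem core (prefixes : List String) (only : Option String) (m : String → Bool)
    (hpre : only.getD "" = "" ∨ only.getD "" ∈ prefixes ∨ ∀ p ∈ prefixes, m p = false) :
    (if !(only.getD "" == "") then
      if (prefixes.map m).count true = 1 then
        match PySem.List.index? prefixes (only.getD "") with
        | some i => (prefixes.map m).getD i false
        | none => false
      else if 1 < (prefixes.map m).count true then
        match PySem.List.max? (((prefixes.zip (prefixes.map m)).filter (fun p => p.2)).map (fun p => p.1) |>.map (fun s => PySem.Str.len s)) (fun x => x) with
        | none => false
        | some mx =>
          match PySem.List.index? (((prefixes.zip (prefixes.map m)).filter (fun p => p.2)).map (fun p => p.1) |>.map (fun s => PySem.Str.len s)) mx with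
          | none => false
          | some max_index =>
            match (((prefixes.zip (prefixes.map m)).filter (fun p => p.2)).map (fun p => p.1))[max_index]? with
            | none => false
            | some best =>
              match PySem.List.index? prefixes best, PySem.List.index? prefixes (only.getD "") with
              | some i, some j => decide (i = j)
              | _, _ => false
      else false
    else decide (0 < (prefixes.map m).count true))
    =
    (if (only.getD "" == "") then
      (prefixes.foldl (fun best p =>
        if m p && (best.elim true (fun b => decide (PySem.Str.len b < PySem.Str.len p)))
        then some p else best) none).isSome
    else
      (prefixes.foldl (fun best p =>
        if m p && (best.elim true (fun b => decide (PySem.Str.len b < PySem.Str.len p)))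
        then some p else best) none) == some (only.getD "")) := by
  set s : String := only.getD "" with hsdef
  rw [fold_best_eq m (fun p => PySem.Str.len p) prefixes none, ← max?_eq_foldl]
  by_cases hs : s = ""
  · simp only [hs, BEq.rfl, Bool.not_true, Bool.false_eq_true, if_false, if_true]
    exact a_falsy_eq_core prefixes m
  · have hsbeq : (s == "") = false := by simp [hs]
    simp only [hsbeq, Bool.not_false, if_true, Bool.false_eq_true, if_false]
    have hpre' : s ∈ prefixes ∨ ∀ p ∈ prefixes, m p = false := by
      rcases hpre with h | h | h
      · exact absurd h hs
      · exact Or.inl h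
      · exact Or.inr h
    rw [count_map_true]
    cases hma : prefixes.filter m with
    | nil =>
      have h0 : PySem.List.max? ([] : List String) (fun p => PySem.Str.len p) = none := by
        rw [max?_eq_foldl]; rfl
      rw [h0]
      simp
    | cons q rest =>
      have hq_mem : q ∈ prefixes ∧ m q = true := by
        have : q ∈ prefixes.filter m := by rw [hma]; exact List.mem_cons_self
        exact List.mem_filter.mp this
      have hs_mem : s ∈ prefixes := by
        rcases hpre' with h | h
        · exact h
        · exact absurd (h q hq_mem.1) (by simp [hq_mem.2])
      obtain ⟨j, hj⟩ := Option.isSome_iff_exists.mp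
        (by rw [PySem.List.index?_isSome_iff]; exact hs_mem :
          (PySem.List.index? prefixes s).isSome)
      obtain ⟨hjlen, hsj, -⟩ := PySem.List.getElem_of_index?_eq_some hj
      cases rest with
      | nil =>
        -- exactly one match: A returns seen[idx(only)] = m s; B returns (some q == some s)
        have hmaxq : PySem.List.max? [q] (fun p => PySem.Str.len p) = some q :=
          max?_cons_eq_gmax _ q []
        have hgetD : (prefixes.map m).getD j false = m s := by
          rw [List.getD_eq_getElem?_getD, List.getElem?_map,
            List.getElem?_eq_getElem hjlen, hsj]
          rfl
        rw [if_pos (show ([q] : List String).length = 1 from rfl)]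
        simp only [hmaxq, hj, hgetD]
        by_cases hms : m s = true
        · have : s ∈ prefixes.filter m := List.mem_filter.mpr ⟨hs_mem, hms⟩
          rw [hma] at this
          have hsq : s = q := by simpa using this
          subst hsq
          simp [hms]
        · have hqs : ¬ (q = s) := by
            intro h
            rw [h] at hq_mem
            exact hms hq_mem.2
          rw [Bool.not_eq_true] at hms
          simp [hms, hqs]
      | cons r rest' =>
        -- more than one match: A's index chain vs B's string comparison
        have hne1 : ¬ (((q :: r :: rest') : List String).length = 1) := by simp
        have hgt1 : 1 < ((q :: r :: rest') : List String).length := by simp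
        rw [if_neg hne1, if_pos hgt1, zip_filter_map, hma]
        have hmax : PySem.List.max? (q :: r :: rest') (fun p => PySem.Str.len p)
            = some (gmax (fun p => PySem.Str.len p) q (r :: rest')) :=
          max?_cons_eq_gmax _ q (r :: rest')
        set M : String := gmax (fun p => PySem.Str.len p) q (r :: rest') with hMdef
        obtain ⟨k, hmx, hidx, hget⟩ := argmax_chain (fun p => PySem.Str.len p)
          (q :: r :: rest') M hmax
        have hM_mem : M ∈ prefixes := by
          have hMf : M ∈ prefixes.filter m := by
            rw [hma]; exact PySem.List.max?_mem hmax
          exact (List.mem_filter.mp hMf).1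
        obtain ⟨i, hi⟩ := Option.isSome_iff_exists.mp
          (by rw [PySem.List.index?_isSome_iff]; exact hM_mem :
            (PySem.List.index? prefixes M).isSome)
        simp only [hmx, hidx, hget, hmax, hj, hi]
        by_cases hMs : M = s
        · have hij : i = j := by
            rw [hMs] at hi
            rw [hi] at hj
            exact Option.some.inj hj
          simp [hij, hMs]
        · have hij : ¬ (i = j) := by
            intro h
            exact hMs (index?_getElem_eq prefixes M s i j hi hj h)
          simp [hij, hMs]

-- ===== VERDICT (by name: the statement is the Claim_ definition above) =====
theorem pick_value_cols_spec : Claim_equal_pick_value_cols := by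
  intro col prefixes use_ only _ hpre
  unfold Pre_pick_value_cols at hpre
  unfold Spec_pick_value_cols pick_value_cols pick_value_cols_alt
  simp only [seen_eq]
  cases use_ with
  | false =>
    have hpre' : only.getD "" = "" ∨ only.getD "" ∈ prefixes ∨
        ∀ p ∈ prefixes, PySem.Str.isIn p col = false := by simpa using hpre
    simpa using core prefixes only (fun p => PySem.Str.isIn p col) hpre'
  | true =>
    have hpre' : only.getD "" = "" ∨ only.getD "" ∈ prefixes ∨
        ∀ p ∈ prefixes, PySem.Str.isIn (p ++ "_") col = false := by simpa using hpre
    simpa using core prefixes only (fun p => PySem.Str.isIn (p ++ "_") col) hpre'
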